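-- pv_equiv track=rewrite | github.com/Phreaks-2600/PwnMeCTF-2025-quals | Web/Crackford/solve/find_alphabet.py | find_alphabet
-- ===== SOURCE A (Python) =====
-- def find_alphabet(start, encoded):
--     bin_to_check = ""
--     for i in start:
--         bin_to_check += format(ord(i), "#010b")[2:]
--     z = ["_" for i in range(32)]
--     i = 0
--     for chunk in [bin_to_check[i:i+5] for i in range(0, len(bin_to_check), 5)]:
--         index = int(chunk, 2)
--         char = encoded[i]
--         z[index] = char
--         i+=1
--     return "".join(z)
-- ===== SOURCE B (Python) =====
-- def find_alphabet(start, encoded):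
--     # Stream numeric bits instead of building/ slicing a binary string.
--     z = ['_'] * 32
--     bits = []
--     for c in start:
--         o = ord(c)
--         for k in range(7, -1, -1):
--             bits.append((o >> k) & 1)
--     i = 0
--     while bits:
--         chunk, bits = bits[:5], bits[5:]
--         v = 0
--         for b in chunk:
--             v = 2 * v + b
--         z[v] = encoded[i]
--         i += 1
--     return ''.join(z)
-- ===== Notes on version B (the rewrite author's own statement) =====
-- stated objective: alternative
-- what changed: B streams each character's bits numerically (shift/mask into a bit list, take/drop 5-bit chunks accumulated arithmetically) instead of A's formatting every byte into a binary string and slicing it by index ranges with int(chunk,2) re-parsing.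
import Mathlib
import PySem

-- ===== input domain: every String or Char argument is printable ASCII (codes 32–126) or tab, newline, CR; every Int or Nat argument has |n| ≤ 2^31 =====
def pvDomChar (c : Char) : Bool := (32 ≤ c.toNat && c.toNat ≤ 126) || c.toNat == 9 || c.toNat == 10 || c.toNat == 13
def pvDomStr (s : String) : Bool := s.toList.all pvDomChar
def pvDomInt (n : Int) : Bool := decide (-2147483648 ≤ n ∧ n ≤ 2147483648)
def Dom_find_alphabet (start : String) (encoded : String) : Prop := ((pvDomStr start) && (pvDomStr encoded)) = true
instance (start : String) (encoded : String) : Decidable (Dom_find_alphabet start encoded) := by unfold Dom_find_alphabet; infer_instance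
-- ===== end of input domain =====

-- B streams the bits numerically (shift/mask, take/drop chunking) instead of A's building and index-slicing a binary string; objective: alternative decomposition.

-- ===== PORT A =====
def find_alphabet (start : String) (encoded : String) : String :=
  -- format(ord(i), "#010b")[2:] = binary digits of ord(i) zero-filled to width 8; exact for ord(i) ≥ 0
  let bin := start.toList.foldl (fun acc c => acc ++ PySem.Chars.zfill (PySem.Int.toBinChars (c.toNat : Int)) 8) []
  let z : List Char := (PySem.List.pyRange 0 32 1).map (fun _ => '_')
  let chunks := (PySem.List.pyRange 0 (bin.length : Int) 5).map (fun i => PySem.List.slice bin (some i) (some (i + 5)))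
  let res := chunks.foldl (fun (st : List Char × Int) chunk =>
      match PySem.Int.ofCharsBase? chunk 2 with
      | some index =>
        match PySem.Str.pyGet? encoded st.2 with
        | some ch => (PySem.List.pySetD st.1 index ch, st.2 + 1)
        | none => (st.1, st.2 + 1)   -- Python raises IndexError here; excluded by Pre_
      | none => (st.1, st.2 + 1)     -- unreachable: every chunk is a nonempty string of '0'/'1'
    ) (z, 0)
  String.ofList res.1

-- ===== PORT B =====
def find_alphabet_chunkLoop (encoded : String) (bits : List Nat) (z : List Char) (i : Int) : List Char :=
  match bits with
  | [] => z
  | b :: bs =>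
    let chunk := (b :: bs).take 5
    let rest := (b :: bs).drop 5
    let v : Int := chunk.foldl (fun a d => 2 * a + (d : Int)) 0
    let z' := match PySem.Str.pyGet? encoded i with
              | some ch => PySem.List.pySetD z v ch
              | none => z   -- Python raises IndexError here; excluded by Pre_
    find_alphabet_chunkLoop encoded rest z' (i + 1)
termination_by bits.length
decreasing_by simp

def find_alphabet_alt (start : String) (encoded : String) : String :=
  let bits := start.toList.foldl (fun acc c =>
      (PySem.List.pyRange 7 (-1) (-1)).foldl (fun acc2 k => acc2 ++ [(c.toNat >>> k.toNat) &&& 1]) acc) []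
  String.ofList (find_alphabet_chunkLoop encoded bits (List.replicate 32 '_') 0)

-- ===== PRECONDITION & SPEC =====
-- Pre_ excludes exactly the inputs where A raises IndexError: encoded shorter than the number of 5-bit chunks (= ceil(8·len(start)/5)).
def Pre_find_alphabet (start : String) (encoded : String) : Prop :=
  (8 * start.length + 4) / 5 ≤ encoded.length
instance (start : String) (encoded : String) : Decidable (Pre_find_alphabet start encoded) := by unfold Pre_find_alphabet; infer_instance

def pvWitness_find_alphabet : String × String := ("A", "ab")

def Spec_find_alphabet (start : String) (encoded : String) (out : String) : Prop := out = find_alphabet_alt start encoded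
instance (start : String) (encoded : String) (out : String) : Decidable (Spec_find_alphabet start encoded out) := by unfold Spec_find_alphabet; infer_instance

-- ===== CLAIM (what is proved, stated in full; the proofs are below) =====
def Claim_equal_find_alphabet : Prop := ∀ (start : String) (encoded : String), Dom_find_alphabet start encoded → Pre_find_alphabet start encoded → Spec_find_alphabet start encoded (find_alphabet start encoded)

-- ===== LEMMAS AND PROOFS =====

-- '0'/'1' rendering of a bit
def bitChar (d : Nat) : Char := if d = 1 then '1' else '0'

-- the 8 bits of a byte, most significant first (proof-side form of B's inner loop)
def bitsOfByte (o : Nat) : List Nat :=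
  (PySem.List.pyRange 7 (-1) (-1)).map (fun k => (o >>> k.toNat) &&& 1)

-- proof-side characterisation of A's chunk comprehension
def chunksOf (M : List Char) : List (List Char) :=
  match M with
  | [] => []
  | c :: cs => (c :: cs).take 5 :: chunksOf ((c :: cs).drop 5)
termination_by M.length
decreasing_by simp

-- all bit lists of a given length
def allBitLists : Nat → List (List Nat)
  | 0 => [[]]
  | n + 1 => (allBitLists n).flatMap (fun l => [0 :: l, 1 :: l])

lemma mem_allBitLists (c : List Nat) (h : ∀ d ∈ c, d ≤ 1) : c ∈ allBitLists c.length := by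
  induction c with
  | nil => simp [allBitLists]
  | cons b bs ih =>
    have hb : b ≤ 1 := h b (by simp)
    have hbs := ih (fun d hd => h d (by simp [hd]))
    simp only [List.length_cons, allBitLists, List.mem_flatMap]
    refine ⟨bs, hbs, ?_⟩
    interval_cases b <;> simp

-- int(chunk, 2) on a nonempty '0'/'1' string of length ≤ 5 is the bit value
lemma ofCharsBase?_bits (c : List Nat) (h1 : ∀ d ∈ c, d ≤ 1) (h2 : 1 ≤ c.length) (h3 : c.length ≤ 5) :
    PySem.Int.ofCharsBase? (c.map bitChar) 2 = some (c.foldl (fun a d => 2 * a + (d : Int)) 0) := by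
  have hmem : c ∈ allBitLists c.length := mem_allBitLists c h1
  have hall : ∀ n, 1 ≤ n → n ≤ 5 → ∀ c' ∈ allBitLists n,
      PySem.Int.ofCharsBase? (c'.map bitChar) 2 = some (c'.foldl (fun a d => 2 * a + (d : Int)) 0) := by
    decide
  exact hall c.length h2 h3 c hmem

-- format(o, "#010b")[2:] renders exactly the 8 shift/mask bits, for o < 128
lemma byte_bits (o : Nat) (h : o < 128) :
    PySem.Chars.zfill (PySem.Int.toBinChars (o : Int)) 8 = (bitsOfByte o).map bitChar := by
  have hall : ∀ o' : Fin 128,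
      PySem.Chars.zfill (PySem.Int.toBinChars ((o' : Nat) : Int)) 8 = (bitsOfByte (o' : Nat)).map bitChar := by
    decide
  exact hall ⟨o, h⟩

lemma bitsOfByte_le_one (o : Nat) : ∀ d ∈ bitsOfByte o, d ≤ 1 := by
  intro d hd
  simp only [bitsOfByte, List.mem_map] at hd
  obtain ⟨k, _, rfl⟩ := hd
  exact Nat.and_le_right

lemma slice5 (M : List Char) (k : Nat) :
    PySem.List.slice M (some ((0:Int) + 5*(k:Int))) (some ((0:Int) + 5*(k:Int) + 5)) = (M.drop (5*k)).take 5 := by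
  have h2 : (0:Int) + 5*(k:Int) + 5 = ((5*k : Nat) : Int) + ((5:Nat):Int) := by push_cast; norm_num
  have h1 : (0:Int) + 5*(k:Int) = ((5*k : Nat) : Int) := by push_cast; ring
  rw [h2, h1, PySem.List.slice_natCast_add]

lemma pyRange5 (n : Nat) :
    PySem.List.pyRange 0 (n : Int) 5 = List.map (fun k : Nat => (0:Int) + 5 * (k:Int)) (List.range ((n + 4)/5)) := by
  rw [PySem.List.pyRange_of_pos 0 (n : Int) (by norm_num)]
  have hc : (if (0:Int) < (n:Int) then (((n:Int) - 0 + 5 - 1)/5).toNat else 0) = (n + 4)/5 := by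
    split_ifs with h <;> omega
  rw [hc]

-- A's chunk comprehension computes chunksOf
lemma chunks_eq_chunksOf (M : List Char) :
    (PySem.List.pyRange 0 (M.length : Int) 5).map (fun i => PySem.List.slice M (some i) (some (i + 5))) = chunksOf M := by
  induction M using chunksOf.induct with
  | case1 => rw [pyRange5]; simp [chunksOf]
  | case2 c cs ih =>
    rw [pyRange5, List.map_map]
    have hm : ((c :: cs).length + 4) / 5 = (((c :: cs).drop 5).length + 4) / 5 + 1 := by
      simp; omega
    rw [hm, List.range_succ_eq_map, List.map_cons]
    rw [chunksOf]
    congr 1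
    · show PySem.List.slice (c :: cs) (some ((0:Int) + 5*((0:Nat):Int))) (some ((0:Int) + 5*((0:Nat):Int) + 5)) = _
      rw [slice5]; simp
    · rw [← ih, pyRange5, List.map_map, List.map_map]
      apply List.map_congr_left
      intro k hk
      simp only [Function.comp, Nat.succ_eq_add_one]
      rw [slice5 (c :: cs) (k + 1), slice5 ((c :: cs).drop 5) k]
      rw [List.drop_drop]
      congr 2
      omega

-- the main loop equivalence: A's fold over the chunks of the rendered bit string is B's streaming loop
lemma loop_eq (encoded : String) : ∀ (n : Nat) (L : List Nat), L.length ≤ n → (∀ d ∈ L, d ≤ 1) → ∀ (z : List Char) (i : Int),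
    ((chunksOf (L.map bitChar)).foldl (fun (st : List Char × Int) chunk =>
      match PySem.Int.ofCharsBase? chunk 2 with
      | some index =>
        match PySem.Str.pyGet? encoded st.2 with
        | some ch => (PySem.List.pySetD st.1 index ch, st.2 + 1)
        | none => (st.1, st.2 + 1)
      | none => (st.1, st.2 + 1)) (z, i)).1 = find_alphabet_chunkLoop encoded L z i := by
  intro n
  induction n with
  | zero =>
    intro L hlen _ z i
    have : L = [] := List.length_eq_zero_iff.mp (Nat.le_zero.mp hlen)
    subst this
    simp [chunksOf, find_alphabet_chunkLoop]
  | succ n ih =>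
    intro L hlen hb z i
    match L with
    | [] => simp [chunksOf, find_alphabet_chunkLoop]
    | b :: bs =>
      rw [List.map_cons, chunksOf, ← List.map_cons (f := bitChar) (a := b) (l := bs), ← List.map_take, ← List.map_drop, List.foldl_cons]
      rw [ofCharsBase?_bits ((b :: bs).take 5)
        (fun d hd => hb d (List.mem_of_mem_take hd))
        (by simp only [List.length_take, List.length_cons]; omega) (by simp only [List.length_take, List.length_cons]; omega)]
      rw [find_alphabet_chunkLoop]
      simp only
      cases hg : PySem.Str.pyGet? encoded i with
      | some ch =>
        exact ih ((b :: bs).drop 5) (by simp at hlen ⊢; omega)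
          (fun d hd => hb d (List.mem_of_mem_drop hd)) _ _
      | none =>
        exact ih ((b :: bs).drop 5) (by simp at hlen ⊢; omega)
          (fun d hd => hb d (List.mem_of_mem_drop hd)) _ _

-- ===== VERDICT (by name: the statement is the Claim_ definition above) =====
theorem find_alphabet_spec : Claim_equal_find_alphabet := by
  intro start encoded hDom _hPre
  have hchars : ∀ c ∈ start.toList, c.toNat < 128 := by
    intro c hc
    have h1 : pvDomStr start = true := by
      unfold Dom_find_alphabet at hDom
      simp only [Bool.and_eq_true] at hDom
      exact hDom.1
    have := (List.all_eq_true.mp h1) c hc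
    unfold pvDomChar at this
    simp only [Bool.or_eq_true, Bool.and_eq_true, decide_eq_true_eq, beq_iff_eq] at this
    omega
  unfold Spec_find_alphabet find_alphabet find_alphabet_alt
  have hbinB : start.toList.foldl (fun acc c =>
      (PySem.List.pyRange 7 (-1) (-1)).foldl (fun acc2 k => acc2 ++ [(c.toNat >>> k.toNat) &&& 1]) acc) []
      = start.toList.flatMap (fun c => bitsOfByte c.toNat) := by
    have hfun : (fun (acc : List Nat) (c : Char) =>
        (PySem.List.pyRange 7 (-1) (-1)).foldl (fun acc2 k => acc2 ++ [(c.toNat >>> k.toNat) &&& 1]) acc)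
        = (fun acc c => acc ++ bitsOfByte c.toNat) := by
      funext acc c
      rw [PySem.List.foldl_append_singleton_eq_map]
      rfl
    rw [hfun, PySem.List.foldl_append_eq_flatMap, List.nil_append]
  have hbinA : start.toList.foldl (fun acc c => acc ++ PySem.Chars.zfill (PySem.Int.toBinChars (c.toNat : Int)) 8) []
      = (start.toList.flatMap (fun c => bitsOfByte c.toNat)).map bitChar := by
    rw [PySem.List.foldl_append_eq_flatMap, List.nil_append, List.map_flatMap]
    simp only [List.flatMap_def]
    congr 1
    exact List.map_congr_left (fun c hc => byte_bits c.toNat (hchars c hc))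
  rw [hbinA, hbinB]
  set L := start.toList.flatMap (fun c => bitsOfByte c.toNat) with hLdef
  have hL : ∀ d ∈ L, d ≤ 1 := by
    intro d hd
    rw [hLdef, List.mem_flatMap] at hd
    obtain ⟨c, _, hd⟩ := hd
    exact bitsOfByte_le_one c.toNat d hd
  have hz : (PySem.List.pyRange 0 32 1).map (fun _ : Int => '_') = List.replicate 32 '_' := by decide
  dsimp only
  rw [hz, chunks_eq_chunksOf]
  exact congrArg String.ofList (loop_eq encoded L.length L le_rfl hL (List.replicate 32 '_') 0)
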